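-- pv_equiv track=rewrite | github.com/jmarcos00312/python-algo-solution | alt_merge_str.py | mergeAltStr
-- ===== SOURCE A (Python) =====
-- def mergeAltStr(word1, word2):
--     word1_len = len(word1)
--     word2_len = len(word2)
--     i = 0 # word1 index
--     j = 0 # word2 index
--     final = []
--
--     while i < word1_len or j < word2_len:
--         if i < word1_len:
--             final.append(word1[i])
--             i+=1
--         # final = ["a"]
--         # i = 1
--             # final = ["a", "q", "b"]
--             # i = 2
--                 # final = ["a", "q", "b", "w"]
--                 # j = 2
--                 # END
--         if j < word2_len:
--             final.append(word2[j])
--             j+=1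
--         # final = ["a", "q"]
--         # j = 1
--             # final = ["a", "q", "b", "w"]
--             # j = 2
--                 # final = ["a", "q", "b", "w", "e"]
--                 # j = 3
--                     # final = ["a", "q", "b", "w", "e", "r"]
--                     # j = 4
--
--     result = ''.join(map(str, final))
--     return result
-- ===== SOURCE B (Python) =====
-- def mergeAltStr(word1, word2):
--     n = min(len(word1), len(word2))
--     final = []
--     for a, b in zip(word1, word2):
--         final.append(a)
--         final.append(b)
--     final.extend(word1[n:])
--     final.extend(word2[n:])
--     result = ''.join(map(str, final))
--     return result
-- ===== Notes on version B (the rewrite author's own statement) =====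
-- stated objective: idiomatic
-- what changed: Replaced the two-counter while loop with guarded per-index appends by a zip over the common prefix followed by extending with the two tail slices.
import Mathlib
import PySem

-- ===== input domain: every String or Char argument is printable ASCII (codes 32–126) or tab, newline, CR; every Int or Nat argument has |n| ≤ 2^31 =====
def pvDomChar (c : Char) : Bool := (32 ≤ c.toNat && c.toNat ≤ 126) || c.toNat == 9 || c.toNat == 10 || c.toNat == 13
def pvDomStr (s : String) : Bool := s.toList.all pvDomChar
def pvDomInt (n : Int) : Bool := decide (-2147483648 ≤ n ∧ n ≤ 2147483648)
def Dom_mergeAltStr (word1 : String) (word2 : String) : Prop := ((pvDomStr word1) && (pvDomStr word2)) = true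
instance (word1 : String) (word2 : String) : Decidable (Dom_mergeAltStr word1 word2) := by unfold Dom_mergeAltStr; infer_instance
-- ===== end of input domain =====

-- B replaces A's two-counter guarded while loop by a zip over the common prefix plus the two tail slices (idiomatic; same cost).


-- ===== PORT A =====
-- A's while loop: two counters i, j; each iteration appends word1[i] (if i < len1)
-- then word2[j] (if j < len2).  Indices are always in range at the access sites
-- (guarded by the same comparison), so List.getD is exact here.
def mergeAltStrLoop (w1 w2 : List Char) (i j : Nat) (final : List Char) : List Char :=
  if i < w1.length ∨ j < w2.length then
    -- body: 'if i < len1: append word1[i]; i += 1' then 'if j < len2: append word2[j]; j += 1'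
    if i < w1.length then
      if j < w2.length then
        mergeAltStrLoop w1 w2 (i + 1) (j + 1) (final ++ [w1.getD i ' '] ++ [w2.getD j ' '])
      else
        mergeAltStrLoop w1 w2 (i + 1) j (final ++ [w1.getD i ' '])
    else
      if j < w2.length then
        mergeAltStrLoop w1 w2 i (j + 1) (final ++ [w2.getD j ' '])
      else
        final
  else final
termination_by (w1.length - i) + (w2.length - j)
decreasing_by all_goals omega

def mergeAltStr (word1 : String) (word2 : String) : String :=
  -- ''.join(map(str, final)) on a list of characters is the string of those characters
  String.ofList (mergeAltStrLoop word1.toList word2.toList 0 0 [])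

-- ===== PORT B =====
def mergeAltStr_alt (word1 : String) (word2 : String) : String :=
  let w1 := word1.toList
  let w2 := word2.toList
  let n := min w1.length w2.length
  let final := (List.zip w1 w2).foldl (fun acc p => acc ++ [p.1, p.2]) []
  let final := final ++ w1.drop n ++ w2.drop n
  String.ofList final

-- ===== PRECONDITION & SPEC =====
def Spec_mergeAltStr (word1 : String) (word2 : String) (out : String) : Prop := out = mergeAltStr_alt word1 word2
instance (word1 : String) (word2 : String) (out : String) : Decidable (Spec_mergeAltStr word1 word2 out) := by unfold Spec_mergeAltStr; infer_instance

-- ===== CLAIM (what is proved, stated in full; the proofs are below) =====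
def Claim_equal_mergeAltStr : Prop := ∀ (word1 : String) (word2 : String), Dom_mergeAltStr word1 word2 → Spec_mergeAltStr word1 word2 (mergeAltStr word1 word2)

-- ===== LEMMAS AND PROOFS =====

-- the common interleaving both programs compute
def pvMerge : List Char → List Char → List Char
  | [], ys => ys
  | xs, [] => xs
  | x :: xs, y :: ys => x :: y :: pvMerge xs ys

theorem mergeAltStrLoop_eq (w1 w2 : List Char) (i j : Nat) (acc : List Char) :
    mergeAltStrLoop w1 w2 i j acc = acc ++ pvMerge (w1.drop i) (w2.drop j) := by
  induction i, j, acc using mergeAltStrLoop.induct (w1 := w1) (w2 := w2) with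
  | case1 i j acc h h1 h2 ih =>
    rw [mergeAltStrLoop, if_pos h, if_pos h1, if_pos h2, ih]
    rw [show w1.drop i = w1.getD i ' ' :: w1.drop (i+1) by
          rw [List.getD_eq_getElem _ _ h1]; exact List.drop_eq_getElem_cons h1,
        show w2.drop j = w2.getD j ' ' :: w2.drop (j+1) by
          rw [List.getD_eq_getElem _ _ h2]; exact List.drop_eq_getElem_cons h2]
    simp [pvMerge]
  | case2 i j acc h h1 h2 ih =>
    rw [mergeAltStrLoop, if_pos h, if_pos h1, if_neg h2, ih]
    rw [show w1.drop i = w1.getD i ' ' :: w1.drop (i+1) by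
          rw [List.getD_eq_getElem _ _ h1]; exact List.drop_eq_getElem_cons h1,
        List.drop_eq_nil_of_le (show w2.length ≤ j by omega)]
    cases hx : w1.drop (i+1) <;> simp [pvMerge]
  | case3 i j acc h h1 h2 ih =>
    rw [mergeAltStrLoop, if_pos h, if_neg h1, if_pos h2, ih]
    rw [show w2.drop j = w2.getD j ' ' :: w2.drop (j+1) by
          rw [List.getD_eq_getElem _ _ h2]; exact List.drop_eq_getElem_cons h2,
        List.drop_eq_nil_of_le (show w1.length ≤ i by omega)]
    simp [pvMerge]
  | case4 i j acc h h1 h2 => omega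
  | case5 i j acc h =>
    rw [mergeAltStrLoop, if_neg h]
    rw [not_or] at h
    simp only [Nat.not_lt] at h
    rw [List.drop_eq_nil_of_le (by omega), List.drop_eq_nil_of_le (by omega)]
    simp [pvMerge]

theorem zipFold_append (l : List (Char × Char)) (acc : List Char) :
    l.foldl (fun acc p => acc ++ [p.1, p.2]) acc
      = acc ++ l.foldl (fun acc p => acc ++ [p.1, p.2]) [] := by
  induction l generalizing acc with
  | nil => simp
  | cons p t ih =>
    simp only [List.foldl_cons]
    rw [ih]
    conv_rhs => rw [ih]
    simp

theorem alt_eq_pvMerge (w1 w2 : List Char) :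
    (List.zip w1 w2).foldl (fun acc p => acc ++ [p.1, p.2]) []
        ++ w1.drop (min w1.length w2.length) ++ w2.drop (min w1.length w2.length)
      = pvMerge w1 w2 := by
  induction w1 generalizing w2 with
  | nil => cases w2 <;> simp [pvMerge]
  | cons x xs ih =>
    cases w2 with
    | nil => simp [pvMerge]
    | cons y ys =>
      simp only [List.zip_cons_cons, List.foldl_cons, List.nil_append]
      rw [zipFold_append]
      have hmin : min (x :: xs).length (y :: ys).length
          = min xs.length ys.length + 1 := by simp [Nat.succ_min_succ]
      rw [hmin]
      simp only [List.drop_succ_cons, pvMerge]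
      rw [← ih ys]
      simp

-- ===== VERDICT (by name: the statement is the Claim_ definition above) =====
theorem mergeAltStr_spec : Claim_equal_mergeAltStr := by
  intro word1 word2 _
  unfold Spec_mergeAltStr mergeAltStr mergeAltStr_alt
  rw [mergeAltStrLoop_eq]
  simp only [List.drop_zero, List.nil_append]
  rw [← alt_eq_pvMerge word1.toList word2.toList]
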